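-- pv_equiv track=rewrite | github.com/SandorSzabolcs/einjax | api.py | _derive_output_spec
-- ===== SOURCE A (Python) =====
-- def _derive_output_spec(
--     formula: str,
--     in_specs: list[tuple[str | None, ...]],
-- ) -> tuple[str | None, ...]:
--     """Derive output PartitionSpec from einsum formula and input specs.
--
--     Maps each input index label to its sharding axis, then builds the
--     output spec from the output labels.
--
--     Args:
--         formula: Einsum formula (e.g., "ij,jk->ik").
--         in_specs: PartitionSpec tuples for each input.
--
--     Returns:
--         PartitionSpec tuple for the output.
--     """
--     input_part, output_labels = formula.split("->")
--     input_labels_list = input_part.split(",")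
--
--     # Build label -> axis mapping (first occurrence wins)
--     label_to_axis: dict[str, str | None] = {}
--     for subscripts, spec in zip(input_labels_list, in_specs):
--         for label, axis in zip(subscripts, spec):
--             if label not in label_to_axis:
--                 label_to_axis[label] = axis
--
--     return tuple(label_to_axis.get(label) for label in output_labels)
-- ===== SOURCE B (Python) =====
-- def _find_axis(label, input_labels_list, in_specs):
--     for subscripts, spec in zip(input_labels_list, in_specs):
--         for l, ax in zip(subscripts, spec):
--             if l == label:
--                 return ax
--     return None
--
--
-- def _derive_output_spec(formula, in_specs):
--     input_part, output_labels = formula.split("->")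
--     input_labels_list = input_part.split(",")
--     return tuple(
--         _find_axis(label, input_labels_list, in_specs) for label in output_labels
--     )
-- ===== Notes on version B (the rewrite author's own statement) =====
-- stated objective: simpler
-- what changed: B drops the first-occurrence-wins dict entirely and instead, for each output label, scans the zipped (subscripts, spec) pairs directly for the first position carrying that label.
import Mathlib
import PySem

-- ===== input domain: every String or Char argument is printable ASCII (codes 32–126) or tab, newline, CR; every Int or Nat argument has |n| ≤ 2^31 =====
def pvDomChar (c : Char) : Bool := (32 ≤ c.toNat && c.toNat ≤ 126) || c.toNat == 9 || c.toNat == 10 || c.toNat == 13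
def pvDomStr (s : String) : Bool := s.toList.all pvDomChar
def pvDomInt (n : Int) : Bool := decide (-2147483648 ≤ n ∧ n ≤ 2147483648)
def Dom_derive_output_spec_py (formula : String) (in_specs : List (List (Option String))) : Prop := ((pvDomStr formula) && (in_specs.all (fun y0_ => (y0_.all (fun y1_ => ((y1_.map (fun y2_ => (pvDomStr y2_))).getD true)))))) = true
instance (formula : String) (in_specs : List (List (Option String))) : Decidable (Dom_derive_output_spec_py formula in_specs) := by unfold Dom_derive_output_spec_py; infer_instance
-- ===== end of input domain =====

-- One honest line: B replaces A's precomputed first-occurrence-wins dict with a direct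
-- per-output-label scan of the zipped (subscripts, spec) pairs; objective: simpler, same values.

-- ===== PORT A =====
-- A's inner loop body: 'if label not in label_to_axis: label_to_axis[label] = axis'
-- (keys are the single characters; exact, since Python compares the 1-char strings)
def stepInner (d : PySem.Dict Char (Option String)) (q : Char × Option String) : PySem.Dict Char (Option String) :=
  if d.contains q.1 then d else d.insert q.1 q.2

-- A's outer loop body: 'for label, axis in zip(subscripts, spec): …'
def stepOuter (d : PySem.Dict Char (Option String)) (p : String × List (Option String)) : PySem.Dict Char (Option String) :=
  (p.1.toList.zip p.2).foldl stepInner d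

def derive_output_spec_py (formula : String) (in_specs : List (List (Option String))) : List (Option String) :=
  match PySem.Str.split? formula "->" with
  | some [input_part, output_labels] =>
    let input_labels_list := PySem.Str.split? input_part "," |>.getD []
    let label_to_axis : PySem.Dict Char (Option String) :=
      (input_labels_list.zip in_specs).foldl stepOuter PySem.Dict.empty
    output_labels.toList.map (fun c => label_to_axis.getD c none)
  | _ => []  -- Python's tuple unpacking raises ValueError here; excluded by Pre_

-- ===== PORT B =====
-- Source B's _find_axis: outer loop over zip(input_labels_list, in_specs),
-- inner loop over zip(subscripts, spec), return the first matching axis, else None.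
def findAxis (label : Char) (pairs : List (String × List (Option String))) : Option String :=
  match pairs with
  | [] => none
  | (subscripts, spec) :: rest =>
    match (subscripts.toList.zip spec).find? (fun q => q.1 == label) with
    | some q => q.2
    | none => findAxis label rest

def derive_output_spec_py_alt (formula : String) (in_specs : List (List (Option String))) : List (Option String) :=
  match PySem.Str.split? formula "->" with
  | none => []  -- unreachable (sep ≠ "")
  | some parts =>
    -- the two-element unpack 'input_part, output_labels = …' (raises otherwise; excluded by Pre_)
    if parts.length = 2 then
      (parts.getD 1 "").toList.map
        (fun c => findAxis c (((PySem.Str.split? (parts.getD 0 "") ",").getD []).zip in_specs))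
    else []

-- ===== PRECONDITION & SPEC =====
-- Pre_ excludes exactly the formulas without exactly one "->": there Python's tuple
-- unpacking of formula.split("->") raises ValueError (in A and in B alike).
def Pre_derive_output_spec_py (formula : String) (in_specs : List (List (Option String))) : Prop :=
  ((PySem.Str.split? formula "->").getD []).length = 2
instance (formula : String) (in_specs : List (List (Option String))) : Decidable (Pre_derive_output_spec_py formula in_specs) := by unfold Pre_derive_output_spec_py; infer_instance

def pvWitness_derive_output_spec_py : String × List (List (Option String)) :=
  ("ij,jk->ik", [[some "x", none], [none, some "y"]])

def Spec_derive_output_spec_py (formula : String) (in_specs : List (List (Option String))) (out : List (Option String)) : Prop := out = derive_output_spec_py_alt formula in_specs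
instance (formula : String) (in_specs : List (List (Option String))) (out : List (Option String)) : Decidable (Spec_derive_output_spec_py formula in_specs out) := by unfold Spec_derive_output_spec_py; infer_instance

-- ===== CLAIM (what is proved, stated in full; the proofs are below) =====
def Claim_equal_derive_output_spec_py : Prop := ∀ (formula : String) (in_specs : List (List (Option String))), Dom_derive_output_spec_py formula in_specs → Pre_derive_output_spec_py formula in_specs → Spec_derive_output_spec_py formula in_specs (derive_output_spec_py formula in_specs)

-- ===== LEMMAS AND PROOFS =====

lemma contains_foldl_inner (qs : List (Char × Option String)) (d : PySem.Dict Char (Option String)) (c : Char) :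
    (qs.foldl stepInner d).contains c = (d.contains c || qs.any (fun q => q.1 == c)) := by
  induction qs generalizing d with
  | nil => simp
  | cons q rest ih =>
    simp only [List.foldl_cons, List.any_cons, ih]
    unfold stepInner
    split_ifs with h
    · by_cases hc : q.1 = c
      · subst hc; simp [h]
      · have h1 : (q.1 == c) = false := beq_eq_false_iff_ne.mpr hc
        simp [h1]
    · rw [PySem.Dict.contains_insert]
      by_cases hc : q.1 = c
      · subst hc; simp
      · have h1 : (q.1 == c) = false := beq_eq_false_iff_ne.mpr hc
        have h2 : (c == q.1) = false := beq_eq_false_iff_ne.mpr (Ne.symm hc)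
        simp [h1, h2]

lemma getD_foldl_inner (qs : List (Char × Option String)) (d : PySem.Dict Char (Option String)) (c : Char) :
    (qs.foldl stepInner d).getD c none =
      if d.contains c then d.getD c none
      else (match qs.find? (fun q => q.1 == c) with
            | some q => q.2
            | none => none) := by
  induction qs generalizing d with
  | nil =>
    simp only [List.foldl_nil, List.find?_nil]
    split_ifs with h
    · rfl
    · exact PySem.Dict.getD_of_not_contains d none (Bool.eq_false_iff.mpr h)
  | cons q rest ih =>
    simp only [List.foldl_cons, List.find?_cons]
    rw [ih]
    unfold stepInner
    by_cases h : d.contains q.1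
    · rw [if_pos h]
      by_cases hqc : q.1 = c
      · subst hqc; simp [h]
      · have h1 : (q.1 == c) = false := beq_eq_false_iff_ne.mpr hqc
        simp [h1]
    · rw [if_neg h]
      by_cases hqc : q.1 = c
      · subst hqc
        simp [PySem.Dict.contains_insert_self, PySem.Dict.getD_insert_self,
          Bool.eq_false_iff.mpr h]
      · have h1 : (q.1 == c) = false := beq_eq_false_iff_ne.mpr hqc
        rw [PySem.Dict.contains_insert, PySem.Dict.getD_insert]
        have h2 : (c == q.1) = false := beq_eq_false_iff_ne.mpr (Ne.symm hqc)
        have h3 : ¬ c = q.1 := fun e => hqc e.symm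
        simp [h1, h2, h3]

lemma getD_foldl_outer (pairs : List (String × List (Option String))) (d : PySem.Dict Char (Option String)) (c : Char) :
    (pairs.foldl stepOuter d).getD c none =
      if d.contains c then d.getD c none else findAxis c pairs := by
  induction pairs generalizing d with
  | nil =>
    simp only [List.foldl_nil, findAxis]
    split_ifs with h
    · rfl
    · exact PySem.Dict.getD_of_not_contains d none (Bool.eq_false_iff.mpr h)
  | cons p rest ih =>
    obtain ⟨subs, spec⟩ := p
    simp only [List.foldl_cons]
    rw [ih]
    simp only [stepOuter, contains_foldl_inner, getD_foldl_inner, findAxis]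
    by_cases h : d.contains c
    · simp [h]
    · simp only [Bool.eq_false_iff.mpr h, Bool.false_or]
      cases hf : (subs.toList.zip spec).find? (fun q => q.1 == c) with
      | some r =>
        have hany : (subs.toList.zip spec).any (fun q => q.1 == c) = true :=
          List.any_eq_true.mpr ⟨r, List.mem_of_find?_eq_some hf,
            List.find?_some (p := fun q : Char × Option String => q.1 == c) hf⟩
        simp [hany]
      | none =>
        have hany : (subs.toList.zip spec).any (fun q => q.1 == c) = false :=
          List.any_eq_false.mpr (fun x hx => by
            simpa using List.find?_eq_none.mp hf x hx)
        simp [hany]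

-- ===== VERDICT (by name: the statement is the Claim_ definition above) =====
theorem derive_output_spec_py_spec : Claim_equal_derive_output_spec_py := by
  intro formula in_specs _ hpre
  unfold Spec_derive_output_spec_py derive_output_spec_py derive_output_spec_py_alt
  unfold Pre_derive_output_spec_py at hpre
  cases hsp : PySem.Str.split? formula "->" with
  | none => rfl
  | some l =>
    rw [hsp] at hpre
    match l with
    | [] => simp at hpre
    | [_] => simp at hpre
    | _ :: _ :: _ :: _ => simp at hpre
    | [input_part, output_labels] =>
      simp only []
      refine List.map_congr_left (fun c _ => ?_)
      rw [getD_foldl_outer, if_neg (by simp)]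
      rfl
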